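-- pv_equiv track=rewrite | github.com/gikf/advent-of-code | advent-of-code-2015/day 13/main.py | score_seating
-- ===== SOURCE A (Python) =====
-- def score_seating(seating, preferences):
--     """Score seating using preferences."""
--     score = 0
--     table_size = len(seating)
--     for index, name in enumerate(seating):
--         for seat_index in ((index - 1) % table_size,
--                            (index + 1) % table_size):
--             seating_by = seating[seat_index]
--             score += preferences.get(name, {}).get(seating_by, 0)
--     return score
-- ===== SOURCE B (Python) =====
-- def score_seating(seating, preferences):
--     """Score seating using preferences.
--
--     Staged: materialize all directed adjacent pairs, aggregate them into a
--     count table, then take one weighted preference lookup per distinct pair.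
--     """
--     n = len(seating)
--     pairs = []
--     for i in range(n):
--         a, b = seating[i], seating[(i + 1) % n]
--         pairs.append((a, b))
--         pairs.append((b, a))
--     counts = {}
--     for pair in pairs:
--         counts[pair] = counts.get(pair, 0) + 1
--     return sum(cnt * preferences.get(x, {}).get(y, 0)
--                for (x, y), cnt in counts.items())
-- ===== Notes on version B (the rewrite author's own statement) =====
-- stated objective: alternative
-- what changed: Instead of accumulating a preference lookup per seat-neighbor step, B stages the computation: it materializes the list of directed adjacent pairs, aggregates it into a count dictionary, and returns a weighted sum with one preference lookup per distinct pair.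
import Mathlib
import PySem

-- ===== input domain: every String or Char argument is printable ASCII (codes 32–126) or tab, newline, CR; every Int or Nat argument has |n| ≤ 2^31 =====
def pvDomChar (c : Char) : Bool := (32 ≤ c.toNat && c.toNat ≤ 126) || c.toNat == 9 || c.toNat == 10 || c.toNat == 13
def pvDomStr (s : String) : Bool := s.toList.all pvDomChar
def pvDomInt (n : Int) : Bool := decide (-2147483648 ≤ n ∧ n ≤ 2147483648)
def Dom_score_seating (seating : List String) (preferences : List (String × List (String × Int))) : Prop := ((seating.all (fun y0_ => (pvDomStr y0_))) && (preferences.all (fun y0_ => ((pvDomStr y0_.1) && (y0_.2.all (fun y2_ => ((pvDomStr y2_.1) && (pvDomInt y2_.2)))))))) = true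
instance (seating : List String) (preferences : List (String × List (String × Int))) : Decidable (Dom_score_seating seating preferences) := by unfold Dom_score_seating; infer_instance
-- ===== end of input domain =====

-- B stages the computation differently: it materializes the directed adjacent pairs, counts
-- them in a dictionary, then takes one weighted preference lookup per distinct pair
-- (objective: alternative decomposition, same cost).

-- ===== PORT A =====
def score_seating (seating : List String) (preferences : List (String × List (String × Int))) : Int :=
  let table_size : Int := seating.length
  (PySem.List.enumerate seating).foldl
    (fun score p =>
      let index := p.1
      let name := p.2
      [PySem.Int.mod (index - 1) table_size, PySem.Int.mod (index + 1) table_size].foldl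
        (fun score seat_index =>
          let seating_by := (PySem.List.pyGet? seating seat_index).getD ""
          score + ((((preferences.lookup name).getD []).lookup seating_by).getD 0))
        score)
    0

-- ===== PORT B =====
def score_seating_alt (seating : List String) (preferences : List (String × List (String × Int))) : Int :=
  let n : Int := seating.length
  let pairs : List (String × String) :=
    (PySem.List.pyRange 0 n 1).foldl
      (fun ps i =>
        let a := (PySem.List.pyGet? seating i).getD ""
        let b := (PySem.List.pyGet? seating (PySem.Int.mod (i + 1) n)).getD ""
        ps ++ [(a, b)] ++ [(b, a)])
      []
  let counts : PySem.Dict (String × String) Int :=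
    pairs.foldl (fun d pair => d.insert pair (d.getD pair 0 + 1)) PySem.Dict.empty
  counts.items.foldl
    (fun s kv => s + kv.2 * ((((preferences.lookup kv.1.1).getD []).lookup kv.1.2).getD 0))
    0

-- ===== PRECONDITION & SPEC =====
def Spec_score_seating (seating : List String) (preferences : List (String × List (String × Int))) (out : Int) : Prop := out = score_seating_alt seating preferences
instance (seating : List String) (preferences : List (String × List (String × Int))) (out : Int) : Decidable (Spec_score_seating seating preferences out) := by unfold Spec_score_seating; infer_instance

-- ===== CLAIM (what is proved, stated in full; the proofs are below) =====
def Claim_equal_score_seating : Prop := ∀ (seating : List String) (preferences : List (String × List (String × Int))), Dom_score_seating seating preferences → Spec_score_seating seating preferences (score_seating seating preferences)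

-- ===== LEMMAS AND PROOFS =====

-- proof-side abbreviations: the preference lookup both programs perform, and list indexing with default
def pvPref (preferences : List (String × List (String × Int))) (a b : String) : Int :=
  (((preferences.lookup a).getD []).lookup b).getD 0

def pvNth (xs : List String) (i : Nat) : String := xs.getD i ""

lemma pvNth_pyGet (xs : List String) (k : Nat) :
    (PySem.List.pyGet? xs (k : Int)).getD "" = pvNth xs k := by
  simp [PySem.List.pyGet?_natCast, pvNth, List.getD_eq_getElem?_getD]

lemma pv_mod_shift (n i : Nat) (h : i < n) : ((i + (n - 1)) % n + 1) % n = i := by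
  rw [Nat.mod_add_mod, show i + (n - 1) + 1 = i + n by omega, Nat.add_mod_right,
    Nat.mod_eq_of_lt h]

lemma pv_mod_unshift (n j : Nat) (h : j < n) : ((j + 1) % n + (n - 1)) % n = j := by
  rw [Nat.mod_add_mod, show j + 1 + (n - 1) = j + n by omega, Nat.add_mod_right,
    Nat.mod_eq_of_lt h]

lemma pv_modA_left (i n : Nat) (h : i < n) :
    PySem.Int.mod ((i : Int) - 1) (n : Int) = (((i + (n - 1)) % n : Nat) : Int) := by
  rw [PySem.Int.mod_eq_emod_of_pos (by omega),
    show ((i : Int) - 1) = ((i + (n - 1) : Nat) : Int) - (n : Int) by push_cast; omega,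
    Int.sub_emod_right]
  exact_mod_cast (Int.natCast_mod _ _).symm

lemma pv_modA_right (i n : Nat) (h : i < n) :
    PySem.Int.mod ((i : Int) + 1) (n : Int) = (((i + 1) % n : Nat) : Int) := by
  rw [PySem.Int.mod_eq_emod_of_pos (by omega),
    show ((i : Int) + 1) = ((i + 1 : Nat) : Int) by push_cast; ring]
  exact_mod_cast (Int.natCast_mod _ _).symm

lemma pv_enum_foldl (g : Int × String → Int) :
    ∀ (xs : List String) (s acc : Int),
      (PySem.List.enumerate xs s).foldl (fun a p => a + g p) acc
        = acc + ∑ i ∈ Finset.range xs.length, g ((s + (i : Int), pvNth xs i)) := by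
  intro xs
  induction xs with
  | nil => intro s acc; simp [PySem.List.enumerate_nil]
  | cons x xs ih =>
    intro s acc
    rw [PySem.List.enumerate_cons, List.foldl_cons, ih]
    rw [List.length_cons, Finset.sum_range_succ']
    simp only [pvNth, List.getD_cons_succ, List.getD_cons_zero, Nat.cast_zero, Nat.cast_add,
      Nat.cast_one, add_zero]
    rw [Finset.sum_congr rfl (fun i _ => by rw [show s + 1 + (i : Int) = s + ((i : Int) + 1) by ring])]
    ring

lemma pv_cyclic (preferences : List (String × List (String × Int))) (xs : List String) :
    ∑ i ∈ Finset.range xs.length,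
        pvPref preferences (pvNth xs i) (pvNth xs ((i + (xs.length - 1)) % xs.length))
      = ∑ i ∈ Finset.range xs.length,
        pvPref preferences (pvNth xs ((i + 1) % xs.length)) (pvNth xs i) := by
  apply Finset.sum_nbij' (fun i => (i + (xs.length - 1)) % xs.length)
    (fun j => (j + 1) % xs.length)
  · intro a ha
    exact Finset.mem_range.mpr (Nat.mod_lt _ (by have := Finset.mem_range.mp ha; omega))
  · intro a ha
    exact Finset.mem_range.mpr (Nat.mod_lt _ (by have := Finset.mem_range.mp ha; omega))
  · intro a ha; exact pv_mod_shift _ _ (Finset.mem_range.mp ha)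
  · intro a ha; exact pv_mod_unshift _ _ (Finset.mem_range.mp ha)
  · intro a ha
    rw [pv_mod_shift _ _ (Finset.mem_range.mp ha)]

lemma pv_A_eq (seating : List String) (preferences : List (String × List (String × Int))) :
    score_seating seating preferences
      = ∑ i ∈ Finset.range seating.length,
          (pvPref preferences (pvNth seating i)
              (pvNth seating ((i + (seating.length - 1)) % seating.length))
            + pvPref preferences (pvNth seating i)
              (pvNth seating ((i + 1) % seating.length))) := by
  unfold score_seating
  simp only [List.foldl_cons, List.foldl_nil]
  rw [show (fun (score : Int) (p : Int × String) =>
        score + ((((preferences.lookup p.2).getD []).lookup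
            ((PySem.List.pyGet? seating (PySem.Int.mod (p.1 - 1) seating.length)).getD "")).getD 0)
          + ((((preferences.lookup p.2).getD []).lookup
            ((PySem.List.pyGet? seating (PySem.Int.mod (p.1 + 1) seating.length)).getD "")).getD 0))
      = (fun (score : Int) (p : Int × String) =>
        score + (((((preferences.lookup p.2).getD []).lookup
            ((PySem.List.pyGet? seating (PySem.Int.mod (p.1 - 1) seating.length)).getD "")).getD 0)
          + ((((preferences.lookup p.2).getD []).lookup
            ((PySem.List.pyGet? seating (PySem.Int.mod (p.1 + 1) seating.length)).getD "")).getD 0)))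
      from by funext a p; ring]
  rw [pv_enum_foldl]
  rw [zero_add]
  refine Finset.sum_congr rfl (fun i hi => ?_)
  have h := Finset.mem_range.mp hi
  rw [zero_add, pv_modA_left i _ h, pv_modA_right i _ h, pvNth_pyGet, pvNth_pyGet]
  rfl

-- the weighted sum over a counter's items is the plain sum over the counted list
lemma pv_counter_sum (preferences : List (String × List (String × Int)))
    (L : List (String × String)) :
    (PySem.Dict.counter L).items.foldl
        (fun s kv => s + kv.2 * ((((preferences.lookup kv.1.1).getD []).lookup kv.1.2).getD 0)) 0
      = (L.map (fun p => pvPref preferences p.1 p.2)).sum := by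
  have h1 : (PySem.Dict.counter L).items.foldl
      (fun s kv => s + kv.2 * ((((preferences.lookup kv.1.1).getD []).lookup kv.1.2).getD 0)) 0
      = ((PySem.Dict.counter L).items.map
          (fun kv => kv.2 * ((((preferences.lookup kv.1.1).getD []).lookup kv.1.2).getD 0))).sum := by
    rw [List.sum_eq_foldl, List.foldl_map]
  rw [h1, PySem.Dict.items_counter, List.map_map]
  have h2 : (PySem.Set.ofList L).toFinset = L.toFinset := by
    ext k; simp [PySem.Set.mem_ofList]
  have h3 := List.sum_toFinset
    (f := fun k => ((L.count k : Int)) * pvPref preferences k.1 k.2) (PySem.Set.nodup_ofList L)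
  rw [Function.comp_def]
  unfold pvPref at h3 ⊢
  rw [← h3, h2, Finset.sum_list_map_count]
  refine Finset.sum_congr rfl (fun k _ => ?_)
  rw [nsmul_eq_mul, lawful_beq_subsingleton instBEqProd instBEqOfDecidableEq]

lemma pv_B_eq (seating : List String) (preferences : List (String × List (String × Int))) :
    score_seating_alt seating preferences
      = ∑ i ∈ Finset.range seating.length,
          (pvPref preferences (pvNth seating i) (pvNth seating ((i + 1) % seating.length))
            + pvPref preferences (pvNth seating ((i + 1) % seating.length)) (pvNth seating i)) := by
  unfold score_seating_alt
  dsimp only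
  rw [show (fun (ps : List (String × String)) (i : Int) =>
        ps ++ [((PySem.List.pyGet? seating i).getD "",
                (PySem.List.pyGet? seating (PySem.Int.mod (i + 1) (seating.length : Int))).getD "")]
           ++ [((PySem.List.pyGet? seating (PySem.Int.mod (i + 1) (seating.length : Int))).getD "",
                (PySem.List.pyGet? seating i).getD "")])
      = (fun (ps : List (String × String)) (i : Int) =>
        ps ++ ([((PySem.List.pyGet? seating i).getD "",
                 (PySem.List.pyGet? seating (PySem.Int.mod (i + 1) (seating.length : Int))).getD ""),
                ((PySem.List.pyGet? seating (PySem.Int.mod (i + 1) (seating.length : Int))).getD "",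
                 (PySem.List.pyGet? seating i).getD "")]))
      from by funext ps i; simp]
  rw [PySem.List.foldl_append_eq_flatMap, PySem.Dict.foldl_insert_getD_add_one_eq_counter,
    List.nil_append, pv_counter_sum preferences]
  rw [List.map_flatMap, List.flatMap, List.sum_flatten, List.map_map,
    PySem.List.pyRange_zero_natCast, List.map_map,
    ← List.sum_toFinset _ (List.nodup_range), List.toFinset_range]
  refine Finset.sum_congr rfl (fun i hi => ?_)
  have h := Finset.mem_range.mp hi
  simp only [Function.comp_apply, List.map_cons, List.map_nil, List.sum_cons, List.sum_nil,
    add_zero]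
  rw [pv_modA_right i _ h, pvNth_pyGet, pvNth_pyGet]

-- ===== VERDICT (by name: the statement is the Claim_ definition above) =====
theorem score_seating_spec : Claim_equal_score_seating := by
  intro seating preferences _
  unfold Spec_score_seating
  rw [pv_A_eq, pv_B_eq, Finset.sum_add_distrib, Finset.sum_add_distrib, pv_cyclic]
  exact add_comm _ _
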